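-- pv_equiv track=rewrite | github.com/AB-code-crypto/ibrobot | core/bars_collector.py | _parse_local_symbol
-- ===== SOURCE A (Python) =====
-- from typing import Dict, Iterable, List, Optional, Sequence, Tuple
--
-- MONTH_SEQ = ["H", "M", "U", "Z"]  # Mar / Jun / Sep / Dec
--
-- def _parse_local_symbol(local_symbol: str) -> Tuple[str, str, str]:
--     """
--     Разбирает локальный символ IB фьючерса квартальных серий, например:
--     'MNQZ5' -> ('MNQ', 'Z', '5')
--     'ESM6'  -> ('ES',  'M', '6')
--     """
--     local_symbol = local_symbol.strip().upper()
--     # Найти последнюю букву из H/M/U/Z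
--     idx = max(local_symbol.rfind(m) for m in MONTH_SEQ)
--     if idx <= 0 or idx == len(local_symbol) - 1:
--         raise ValueError(f"Не удалось разобрать localSymbol: {local_symbol}")
--     root = local_symbol[:idx]
--     mon = local_symbol[idx]
--     year_tail = local_symbol[idx + 1:]
--     if not year_tail:
--         raise ValueError(f"Нет годового хвоста у localSymbol: {local_symbol}")
--     return root, mon, year_tail
-- ===== SOURCE B (Python) =====
-- MONTH_LETTERS = {"H", "M", "U", "Z"}  # Mar / Jun / Sep / Dec
--
-- def _parse_local_symbol(local_symbol):
--     s = local_symbol.strip().upper()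
--     idx = -1
--     for i in range(len(s) - 1, -1, -1):
--         if s[i] in MONTH_LETTERS:
--             idx = i
--             break
--     if idx <= 0 or idx == len(s) - 1:
--         raise ValueError(f"Не удалось разобрать localSymbol: {s}")
--     return s[:idx], s[idx], s[idx + 1:]
-- ===== Notes on version B (the rewrite author's own statement) =====
-- stated objective: idiomatic
-- what changed: Replaces the max of four full-string rfind scans with a single reverse pass that stops at the first (i.e. rightmost) month letter found via set membership.
import Mathlib
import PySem

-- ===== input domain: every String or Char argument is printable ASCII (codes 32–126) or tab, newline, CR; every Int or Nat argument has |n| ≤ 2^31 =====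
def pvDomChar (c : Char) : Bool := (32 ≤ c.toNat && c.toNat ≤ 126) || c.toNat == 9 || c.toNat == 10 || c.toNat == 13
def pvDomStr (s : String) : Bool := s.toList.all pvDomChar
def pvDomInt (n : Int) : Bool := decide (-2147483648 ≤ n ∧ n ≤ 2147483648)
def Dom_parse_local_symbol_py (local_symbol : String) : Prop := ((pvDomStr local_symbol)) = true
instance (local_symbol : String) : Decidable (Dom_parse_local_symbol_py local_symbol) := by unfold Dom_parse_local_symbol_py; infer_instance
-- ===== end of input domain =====

-- B replaces the max of four full-string rfind scans by a single reverse scan that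
-- returns the first (rightmost) month-letter index found; same guards and slicing.


-- ===== PORT A =====
def MONTH_SEQ : List String := ["H", "M", "U", "Z"]  -- Mar / Jun / Sep / Dec

def parse_local_symbol_py (local_symbol : String) : String × String × String :=
  let s := PySem.Str.upper (PySem.Str.strip local_symbol)
  -- idx = max(s.rfind(m) for m in MONTH_SEQ); MONTH_SEQ is nonempty, so the getD default is never used
  let idx : Int := (PySem.List.max? (MONTH_SEQ.map (fun m => PySem.Str.rfind s m)) id).getD (-1)
  if idx ≤ 0 ∨ idx = PySem.Str.len s - 1 then ("", "", "")  -- raise ValueError (excluded by Pre_)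
  else
    let root := PySem.Str.slice s none (some idx)
    let mon := match PySem.Str.pyGet? s idx with
      | some c => String.ofList [c]
      | none => ""  -- unreachable: 0 < idx < len(s)
    let year_tail := PySem.Str.slice s (some (idx + 1)) none
    if year_tail = "" then ("", "", "")  -- raise ValueError (excluded by Pre_)
    else (root, mon, year_tail)

-- ===== PORT B =====
def isMonthLetter (c : Char) : Bool := c == 'H' || c == 'M' || c == 'U' || c == 'Z'

-- 'for i in range(len(s)-1, -1, -1): if s[i] in MONTH_LETTERS: idx = i; break' with idx = -1 default;
-- every probed index n is < l.length when started at l.length, so getD is an exact port of s[i]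
def lastMonthIdx (l : List Char) : Nat → Int
  | 0 => -1
  | n + 1 => if isMonthLetter (l[n]?.getD ' ') then (n : Int) else lastMonthIdx l n

def parse_local_symbol_py_alt (local_symbol : String) : String × String × String :=
  let l := (PySem.Str.upper (PySem.Str.strip local_symbol)).toList
  let idx := lastMonthIdx l l.length
  if idx ≤ 0 ∨ idx = (l.length : Int) - 1 then ("", "", "")  -- raise ValueError (excluded by Pre_)
  else
    (String.ofList (l.take idx.toNat),
     String.ofList [l[idx.toNat]?.getD ' '],
     String.ofList (l.drop (idx.toNat + 1)))

-- ===== PRECONDITION & SPEC =====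
-- Pre_ admits exactly the inputs where A returns: the rightmost month letter (H/M/U/Z) of the
-- normalized symbol exists and is interior (not first, not last); elsewhere A raises ValueError.
def Pre_parse_local_symbol_py (local_symbol : String) : Prop :=
  let l := (PySem.Str.upper (PySem.Str.strip local_symbol)).toList
  ∃ i : Fin l.length, 0 < i.1 ∧ i.1 + 1 < l.length ∧ l[i] ∈ (['H', 'M', 'U', 'Z'] : List Char) ∧
    ∀ j : Fin l.length, i.1 < j.1 → l[j] ∉ (['H', 'M', 'U', 'Z'] : List Char)
instance (local_symbol : String) : Decidable (Pre_parse_local_symbol_py local_symbol) := by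
  unfold Pre_parse_local_symbol_py; infer_instance

def pvWitness_parse_local_symbol_py : String := "MNQZ5"

def Spec_parse_local_symbol_py (local_symbol : String) (out : String × String × String) : Prop :=
  out = parse_local_symbol_py_alt local_symbol
instance (local_symbol : String) (out : String × String × String) : Decidable (Spec_parse_local_symbol_py local_symbol out) := by unfold Spec_parse_local_symbol_py; infer_instance

-- ===== CLAIM (what is proved, stated in full; the proofs are below) =====
def Claim_equal_parse_local_symbol_py : Prop := ∀ (local_symbol : String), Dom_parse_local_symbol_py local_symbol → Pre_parse_local_symbol_py local_symbol → Spec_parse_local_symbol_py local_symbol (parse_local_symbol_py local_symbol)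

-- ===== LEMMAS AND PROOFS =====

-- [c].isPrefixOf (l.drop j) tests l[j]? = some c
theorem isPrefixOf_single (l : List Char) (j : Nat) (c : Char) :
    ([c].isPrefixOf (l.drop j)) = (l[j]? == some c) := by
  rcases h : l.drop j with _ | ⟨a, t⟩
  · have hlen : l.length ≤ j := by
      have := congrArg List.length h; simp at this; omega
    simp [List.isPrefixOf, List.getElem?_eq_none hlen]
  · have hj : l[j]? = some a := by
      have h0 : (l.drop j)[0]? = some a := by simp [h]
      simpa using h0
    simp only [List.isPrefixOf, hj, Bool.and_true]
    simp [eq_comm]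

theorem rfind_go_le (l : List Char) (c : Char) (k : Nat) :
    PySem.Chars.rfind.go l [c] k ≤ (k : Int) := by
  induction k with
  | zero => simp only [PySem.Chars.rfind.go]; split <;> omega
  | succ n ih => simp only [PySem.Chars.rfind.go]; split <;> omega

theorem max_key (l : List Char) (k : Nat) :
    max (max (max (PySem.Chars.rfind.go l ['H'] k) (PySem.Chars.rfind.go l ['M'] k))
      (PySem.Chars.rfind.go l ['U'] k)) (PySem.Chars.rfind.go l ['Z'] k)
      = lastMonthIdx l (k + 1) := by
  induction k with
  | zero =>
    simp only [PySem.Chars.rfind.go, lastMonthIdx]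
    have hc : ∀ c : Char, ([c].isPrefixOf l) = (l[0]? == some c) := fun c => by
      simpa using isPrefixOf_single l 0 c
    rcases h : l[0]? with _ | a
    · simp [hc, h, isMonthLetter]
    · simp only [hc, h, Option.getD_some, isMonthLetter, beq_iff_eq, Option.some.injEq,
        Bool.or_eq_true]
      split_ifs <;> first | omega | tauto
  | succ n ih =>
    have bH := rfind_go_le l 'H' n
    have bM := rfind_go_le l 'M' n
    have bU := rfind_go_le l 'U' n
    have bZ := rfind_go_le l 'Z' n
    have hstep : ∀ c : Char, PySem.Chars.rfind.go l [c] (n + 1)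
        = if (l[n + 1]? == some c) then ((n + 1 : Nat) : Int)
          else PySem.Chars.rfind.go l [c] n := by
      intro c
      rw [show PySem.Chars.rfind.go l [c] (n + 1)
          = if [c].isPrefixOf (l.drop (n + 1)) then ((n + 1 : Nat) : Int)
            else PySem.Chars.rfind.go l [c] n from rfl, isPrefixOf_single]
    have hlast : lastMonthIdx l (n + 1 + 1)
        = if isMonthLetter (l[n + 1]?.getD ' ') then ((n + 1 : Nat) : Int)
          else lastMonthIdx l (n + 1) := rfl
    rw [hstep, hstep, hstep, hstep, hlast]
    rcases h : l[n + 1]? with _ | a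
    · have hf : ∀ c : Char, ((none : Option Char) == some c) = false := fun c => rfl
      have hsp : isMonthLetter (Option.getD (none : Option Char) ' ') = false := rfl
      simp only [hf, Bool.false_eq_true, if_false, hsp]
      exact ih
    · simp only [Option.getD_some, isMonthLetter, beq_iff_eq, Option.some.injEq,
        Bool.or_eq_true]
      split_ifs <;> first | omega | exact ih | tauto

theorem max4_getD (a b c d : Int) :
    (PySem.List.max? [a, b, c, d] id).getD (-1) = max (max (max a b) c) d := by
  simp only [PySem.List.max?, List.foldl, id]
  by_cases h1 : a < b <;> by_cases h2 : b < c <;> by_cases h3 : a < c <;>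
    by_cases h4 : b < d <;> by_cases h5 : c < d <;> by_cases h6 : a < d <;>
    simp only [h1, h2, h3, h4, h5, h6, if_true, if_false, Option.getD_some] <;> omega

-- A's idx (max? over the mapped rfinds) equals B's idx (the reverse scan)
theorem idx_agree (s : String) :
    (PySem.List.max? (MONTH_SEQ.map (fun m => PySem.Str.rfind s m)) id).getD (-1)
      = lastMonthIdx s.toList s.toList.length := by
  have hH : ("H" : String).toList = ['H'] := rfl
  have hM : ("M" : String).toList = ['M'] := rfl
  have hU : ("U" : String).toList = ['U'] := rfl
  have hZ : ("Z" : String).toList = ['Z'] := rfl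
  simp only [MONTH_SEQ, List.map, PySem.Str.rfind_eq, hH, hM, hU, hZ, max4_getD,
    PySem.Chars.rfind]
  rcases hl : s.toList.length with _ | k
  · have hnil : s.toList = [] := List.length_eq_zero_iff.mp hl
    simp [hnil, PySem.Chars.rfind.go, lastMonthIdx]
  · have hb : lastMonthIdx s.toList (k + 1 + 1) = lastMonthIdx s.toList (k + 1) := by
      have h2 : s.toList[k + 1]? = none := List.getElem?_eq_none (by omega)
      simp [lastMonthIdx, h2, isMonthLetter]
    rw [← hb]
    exact max_key s.toList (k + 1)

-- the reverse scan returns i when l[i] is a month letter and nothing after it is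
theorem lastMonthIdx_eq (l : List Char) (i : Nat) (hi : i < l.length)
    (hm : isMonthLetter l[i] = true)
    (hr : ∀ j : Fin l.length, i < j.1 → isMonthLetter l[j] = false) :
    ∀ n, i < n → n ≤ l.length → lastMonthIdx l n = (i : Int) := by
  intro n
  induction n with
  | zero => omega
  | succ m ihm =>
    intro hin hnl
    have hm' : m < l.length := by omega
    have hg : l[m]?.getD ' ' = l[m] := by simp [List.getElem?_eq_getElem hm']
    by_cases hmi : m = i
    · subst hmi
      simp [lastMonthIdx, hg, hm]
    · have hf : isMonthLetter l[m] = false := hr ⟨m, hm'⟩ (show i < m by omega)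
      simp only [lastMonthIdx, hg, hf, Bool.false_eq_true, if_false]
      exact ihm (by omega) (by omega)

theorem pv_core (t : String) (i : Fin t.toList.length) (hi0 : 0 < i.1)
    (hilt : i.1 + 1 < t.toList.length)
    (him : t.toList[i] ∈ (['H', 'M', 'U', 'Z'] : List Char))
    (hir : ∀ j : Fin t.toList.length, i.1 < j.1 → t.toList[j] ∉ (['H', 'M', 'U', 'Z'] : List Char)) :
    (let idx : Int := (PySem.List.max? (MONTH_SEQ.map (fun m => PySem.Str.rfind t m)) id).getD (-1)
     if idx ≤ 0 ∨ idx = PySem.Str.len t - 1 then (("", "", "") : String × String × String)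
     else
       let root := PySem.Str.slice t none (some idx)
       let mon := match PySem.Str.pyGet? t idx with
         | some c => String.ofList [c]
         | none => ""
       let year_tail := PySem.Str.slice t (some (idx + 1)) none
       if year_tail = "" then ("", "", "")
       else (root, mon, year_tail))
    = (let l := t.toList
       let idx := lastMonthIdx l l.length
       if idx ≤ 0 ∨ idx = (l.length : Int) - 1 then (("", "", "") : String × String × String)
       else
         (String.ofList (l.take idx.toNat),
          String.ofList [l[idx.toNat]?.getD ' '],
          String.ofList (l.drop (idx.toNat + 1)))) := by
  have him' : isMonthLetter t.toList[i] = true := by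
    simp only [List.mem_cons, List.not_mem_nil, or_false] at him
    simp only [isMonthLetter, Bool.or_eq_true, beq_iff_eq]
    tauto
  have hir' : ∀ j : Fin t.toList.length, i.1 < j.1 → isMonthLetter t.toList[j] = false := by
    intro j hj
    have := hir j hj
    simp only [List.mem_cons, List.not_mem_nil, not_or] at this
    simp only [isMonthLetter, Bool.or_eq_false_iff, beq_eq_false_iff_ne, ne_eq]
    tauto
  have hidx' : lastMonthIdx t.toList t.toList.length = (i.1 : Int) :=
    lastMonthIdx_eq t.toList i.1 i.2 him' hir' t.toList.length (by omega) le_rfl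
  have hidx : (PySem.List.max? (MONTH_SEQ.map (fun m => PySem.Str.rfind t m)) id).getD (-1)
      = (i.1 : Int) := by rw [idx_agree]; exact hidx'
  have hlen : PySem.Str.len t = (t.toList.length : Int) := PySem.Str.len_eq t
  simp only []
  rw [hidx, hidx', hlen]
  have hcond : ¬ ((i.1 : Int) ≤ 0 ∨ (i.1 : Int) = (t.toList.length : Int) - 1) := by
    push_neg
    constructor
    · exact_mod_cast hi0
    · omega
  rw [if_neg hcond, if_neg hcond]
  have htoNat : ((i.1 : Int)).toNat = i.1 := rfl
  have hget : PySem.Str.pyGet? t (i.1 : Int) = some t.toList[i.1] := by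
    have h := PySem.Str.pyGet?_natCast t i.1
    rw [h]
    exact List.getElem?_eq_getElem i.2
  have hroot : PySem.Str.slice t none (some (i.1 : Int))
      = String.ofList (t.toList.take ((i.1 : Int)).toNat) := by
    rw [← String.toList_inj, PySem.Str.toList_slice, PySem.Chars.slice_eq_listSlice,
      PySem.List.slice_to_natCast, String.toList_ofList, htoNat]
  have hmon : t.toList[((i.1 : Int)).toNat]?.getD ' ' = t.toList[i.1] := by
    rw [htoNat]
    simp [List.getElem?_eq_getElem i.2]
  have htail : PySem.Str.slice t (some ((i.1 : Int) + 1)) none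
      = String.ofList (t.toList.drop (((i.1 : Int)).toNat + 1)) := by
    have hc : ((i.1 : Int) + 1) = ((i.1 + 1 : Nat) : Int) := by push_cast; ring
    rw [← String.toList_inj, PySem.Str.toList_slice, PySem.Chars.slice_eq_listSlice, hc,
      PySem.List.slice_from_natCast, String.toList_ofList, htoNat]
  have hne : ¬ (PySem.Str.slice t (some ((i.1 : Int) + 1)) none = "") := by
    rw [htail]
    intro hcontra
    have h2 : t.toList.drop (((i.1 : Int)).toNat + 1) = ([] : List Char) := by
      have h0 := congrArg String.toList hcontra
      rwa [String.toList_ofList] at h0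
    have h3 := congrArg List.length h2
    simp only [List.length_drop, List.length_nil, htoNat] at h3
    omega
  rw [if_neg hne, hget, hroot, htail, hmon]

-- ===== VERDICT (by name: the statement is the Claim_ definition above) =====
theorem parse_local_symbol_py_spec : Claim_equal_parse_local_symbol_py := by
  intro s _ hpre
  obtain ⟨i, hi0, hilt, him, hir⟩ := hpre
  exact pv_core (PySem.Str.upper (PySem.Str.strip s)) i hi0 hilt him hir
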